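-- pv_equiv track=rewrite | github.com/jenu8628/TIL | algorithm/kakao/level2_괄호변환.py | recursive_func
-- ===== SOURCE A (Python) =====
-- def detach_string(string):
--     u, v = "", ""
--     l_cnt, r_cnt = 0, 0
--     # u, v 분리
--     for idx, bracket in enumerate(string):
--         u += bracket
--         if bracket == '(':
--             l_cnt += 1
--         else:
--             r_cnt += 1
--         if l_cnt == r_cnt and idx < len(string):
--             # u가 균형잡힌 괄호 문자열이 된 경우
--             v = string[idx+1:]
--             break
--     return u, v
--
-- def is_correct_string(string):
--     # 스택을 사용해서 올바른 괄호 문자열인지 확인한다.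
--     stack = []
--
--     for s in string:
--         if s == '(':
--             stack.append(s)
--         # s==')' and stack이 비어있지 않을 때가 포함
--         # if s == ')' and stack != [] 과 같다.
--         elif stack:
--             stack.pop()
--     # stack안에 (가 남아있다면 false를 반환
--     # stack이 비어있다면 올바른 괄호 문자열이므로 true를 반환
--     return not stack
--
-- def reverse_string(string):
--     # string을 돌면서  ( -> )로 ) -> (로 변경한다.
--     # 컴프리핸션 기법 사용
--     return "".join(')' if s == '(' else '(' for s in string)
--
-- def recursive_func(string):
--     # 1. 빈 문자열일 경우 빈 문자열 반환
--     if not string: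
--         return ""
--     # 2. 균형잡힌 괄호 문자열 u와 나머지 v로 분리
--     u, v = detach_string(string)
--     # 3. u가 균형잡힌 문자열이라면
--     if is_correct_string(u):
--         # v는 1단계부터 다시 진행하여 3-1. u에 이어 붙혀서 반환
--         return u + recursive_func(v)
--     else:
--         # 4. 문자열 u가 올바른 괄호 문자열이 아니라면 4의 과정을 수행
--         return '(' + recursive_func(v) + ')' + reverse_string(u[1:-1])
-- ===== SOURCE B (Python) =====
-- def recursive_func(string):
--     # Iterative re-implementation: one pass splits the string into its
--     # balanced chunks, then a right-to-left fold assembles the result.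
--     chunks = []
--     cur = []
--     bal = 0
--     for ch in string:
--         cur.append(ch)
--         bal += 1 if ch == '(' else -1
--         if bal == 0:
--             chunks.append(''.join(cur))
--             cur = []
--     if cur:
--         chunks.append(''.join(cur))
--
--     res = ""
--     for u in reversed(chunks):
--         # counter-based correctness test (unmatched ')' clamps at 0)
--         c = 0
--         for ch in u:
--             c = c + 1 if ch == '(' else max(c - 1, 0)
--         if c == 0:
--             res = u + res
--         else:
--             res = '(' + res + ')' + ''.join(')' if ch == '(' else '(' for ch in u[1:-1])
--     return res
-- ===== Notes on version B (the rewrite author's own statement) =====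
-- stated objective: alternative
-- what changed: Replaces A's recursion (detach one balanced prefix, recurse on the rest) by a single pass that splits the whole string into its balanced chunks followed by an explicit right-to-left fold assembling the result, and replaces the stack-list correctness test by a clamped integer counter.
import Mathlib
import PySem

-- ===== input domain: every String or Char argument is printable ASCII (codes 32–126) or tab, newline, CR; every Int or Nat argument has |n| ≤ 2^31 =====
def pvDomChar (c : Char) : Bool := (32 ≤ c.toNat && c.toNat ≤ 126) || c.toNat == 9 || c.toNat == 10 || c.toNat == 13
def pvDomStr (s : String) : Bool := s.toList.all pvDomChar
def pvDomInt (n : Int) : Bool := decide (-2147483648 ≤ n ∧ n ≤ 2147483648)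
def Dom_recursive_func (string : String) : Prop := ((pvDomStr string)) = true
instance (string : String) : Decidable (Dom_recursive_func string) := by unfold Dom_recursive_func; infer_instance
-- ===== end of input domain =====

-- B replaces A's recursion by a one-pass chunk split followed by a right-to-left fold,
-- and the stack-based correctness test by a clamped counter (objective: alternative decomposition).

-- ===== PORT A =====

-- detach_string's loop (the `idx < len(string)` guard is always true, so `break` fires iff l_cnt = r_cnt)
def detachGoA : List Char → List Char → Int → Int → List Char × List Char
  | [], u, _l, _r => (u, [])
  | b :: rest, u, l, r =>
    if (if b = '(' then l + 1 else l) = (if b = '(' then r else r + 1)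
    then (u ++ [b], rest)
    else detachGoA rest (u ++ [b]) (if b = '(' then l + 1 else l) (if b = '(' then r else r + 1)

-- is_correct_string's stack loop (stack holds only '(' so head-push is the same stack)
def stackGoA : List Char → List Char → List Char
  | [], st => st
  | s :: rest, st =>
    if s = '(' then stackGoA rest ('(' :: st)
    else if st ≠ [] then stackGoA rest st.tail
    else stackGoA rest st

-- reverse_string's comprehension
def reverseA (u : List Char) : List Char := u.map (fun s => if s = '(' then ')' else '(')

theorem detachGoA_snd_le : ∀ (s u : List Char) (l r : Int),
    (detachGoA s u l r).2.length ≤ s.length := by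
  intro s
  induction s with
  | nil => intro u l r; simp [detachGoA]
  | cons b rest ih =>
    intro u l r
    rw [detachGoA]
    split <;> split <;>
      first
        | (simp; done)
        | exact le_trans (ih _ _ _) (Nat.le_succ _)

theorem detachGoA_snd_lt (b : Char) (rest u : List Char) (l r : Int) :
    (detachGoA (b :: rest) u l r).2.length < (b :: rest).length := by
  rw [detachGoA]
  split <;> split <;>
    first
      | (simp; done)
      | exact Nat.lt_succ_of_le (detachGoA_snd_le rest _ _ _)

def recA (s : List Char) : List Char :=
  if h : s = [] then []
  else
    if stackGoA (detachGoA s [] 0 0).1 [] = [] then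
      (detachGoA s [] 0 0).1 ++ recA (detachGoA s [] 0 0).2
    else
      '(' :: recA (detachGoA s [] 0 0).2 ++ ')' :: reverseA (((detachGoA s [] 0 0).1.drop 1).dropLast)
termination_by s.length
decreasing_by
  · cases s with
    | nil => exact absurd rfl h
    | cons b rest => exact detachGoA_snd_lt b rest [] 0 0
  · cases s with
    | nil => exact absurd rfl h
    | cons b rest => exact detachGoA_snd_lt b rest [] 0 0

def recursive_func (string : String) : String := String.mk (recA string.toList)

-- ===== PORT B =====

-- one pass splitting the string into balanced chunks (trailing unbalanced part kept)
def chunksGoB : List Char → List Char → Int → List (List Char)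
  | [], cur, _ => if cur = [] then [] else [cur]
  | ch :: rest, cur, bal =>
    if bal + (if ch = '(' then 1 else -1) = 0
    then (cur ++ [ch]) :: chunksGoB rest [] 0
    else chunksGoB rest (cur ++ [ch]) (bal + (if ch = '(' then 1 else -1))

-- counter-based correctness test (unmatched ')' clamps at 0)
def cntGoB : List Char → Int → Int
  | [], c => c
  | ch :: rest, c => cntGoB rest (if ch = '(' then c + 1 else max (c - 1) 0)

def flipB (u : List Char) : List Char :=
  ((u.drop 1).dropLast).map (fun ch => if ch = '(' then ')' else '(')

-- one iteration of the right-to-left assembling loop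
def stepB (res u : List Char) : List Char :=
  if cntGoB u 0 = 0 then u ++ res else '(' :: res ++ ')' :: flipB u

def recursive_func_alt (string : String) : String :=
  String.mk (((chunksGoB string.toList [] 0).reverse).foldl stepB [])

-- ===== PRECONDITION & SPEC =====
def Spec_recursive_func (string : String) (out : String) : Prop := out = recursive_func_alt string
instance (string : String) (out : String) : Decidable (Spec_recursive_func string out) := by unfold Spec_recursive_func; infer_instance

-- ===== CLAIM (what is proved, stated in full; the proofs are below) =====
def Claim_equal_recursive_func : Prop := ∀ (string : String), Dom_recursive_func string → Spec_recursive_func string (recursive_func string)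

-- ===== LEMMAS AND PROOFS =====

-- unfolding step lemmas for the loop bodies
theorem stackGoA_cons_l (rest st : List Char) :
    stackGoA ('(' :: rest) st = stackGoA rest ('(' :: st) := by simp [stackGoA]

theorem stackGoA_cons_r (ch : Char) (h : ch ≠ '(') (rest st : List Char) :
    stackGoA (ch :: rest) st = if st ≠ [] then stackGoA rest st.tail else stackGoA rest st := by
  simp [stackGoA, h]

theorem cntGoB_cons_l (rest : List Char) (c : Int) :
    cntGoB ('(' :: rest) c = cntGoB rest (c + 1) := by simp [cntGoB]

theorem cntGoB_cons_r (ch : Char) (h : ch ≠ '(') (rest : List Char) (c : Int) :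
    cntGoB (ch :: rest) c = cntGoB rest (max (c - 1) 0) := by simp [cntGoB, h]

theorem detachGoA_cons_l (rest u : List Char) (l r : Int) :
    detachGoA ('(' :: rest) u l r =
      if l + 1 = r then (u ++ ['('], rest) else detachGoA rest (u ++ ['(']) (l + 1) r := by
  simp [detachGoA]

theorem detachGoA_cons_r (ch : Char) (h : ch ≠ '(') (rest u : List Char) (l r : Int) :
    detachGoA (ch :: rest) u l r =
      if l = r + 1 then (u ++ [ch], rest) else detachGoA rest (u ++ [ch]) l (r + 1) := by
  simp [detachGoA, h]

theorem chunksGoB_cons_l (rest cur : List Char) (bal : Int) :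
    chunksGoB ('(' :: rest) cur bal =
      if bal + 1 = 0 then (cur ++ ['(']) :: chunksGoB rest [] 0
      else chunksGoB rest (cur ++ ['(']) (bal + 1) := by
  simp [chunksGoB]

theorem chunksGoB_cons_r (ch : Char) (h : ch ≠ '(') (rest cur : List Char) (bal : Int) :
    chunksGoB (ch :: rest) cur bal =
      if bal + -1 = 0 then (cur ++ [ch]) :: chunksGoB rest [] 0
      else chunksGoB rest (cur ++ [ch]) (bal + -1) := by
  simp [chunksGoB, h]

-- A's stack length evolves exactly like B's clamped counter
theorem stack_cnt : ∀ (s st : List Char),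
    ((stackGoA s st).length : Int) = cntGoB s (st.length : Int) := by
  intro s
  induction s with
  | nil => intro st; simp [stackGoA, cntGoB]
  | cons ch rest ih =>
    intro st
    by_cases h : ch = '('
    · subst h
      rw [stackGoA_cons_l, cntGoB_cons_l, ih ('(' :: st)]
      congr 1
    · cases st with
      | nil =>
        rw [stackGoA_cons_r ch h, cntGoB_cons_r ch h]
        simp only [ne_eq, not_true_eq_false, if_false, List.length_nil, Nat.cast_zero]
        have h0 : max ((0 : Int) - 1) 0 = 0 := by norm_num
        rw [h0]
        simpa using ih []
      | cons x st' =>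
        rw [stackGoA_cons_r ch h, cntGoB_cons_r ch h]
        simp only [ne_eq, reduceCtorEq, not_false_eq_true, if_true, List.tail_cons]
        rw [ih st']
        congr 1
        simp only [List.length_cons]
        push_cast
        omega

theorem correct_iff (u : List Char) : (stackGoA u [] = []) ↔ cntGoB u 0 = 0 := by
  have h := stack_cnt u []
  simp only [List.length_nil, Nat.cast_zero] at h
  constructor
  · intro he; rw [he] at h; simpa using h.symm
  · intro he
    rw [he] at h
    have : (stackGoA u []).length = 0 := by exact_mod_cast h
    exact List.length_eq_zero_iff.mp this

-- B's chunk splitter reproduces A's detach_string split points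
theorem chunks_detach : ∀ (s cur : List Char) (l r : Int),
    chunksGoB s cur (l - r) =
      if cur = [] ∧ s = [] then []
      else (detachGoA s cur l r).1 :: chunksGoB (detachGoA s cur l r).2 [] 0 := by
  intro s
  induction s with
  | nil =>
    intro cur l r
    by_cases h : cur = []
    · simp [chunksGoB, h]
    · simp [chunksGoB, detachGoA, h]
  | cons ch rest ih =>
    intro cur l r
    rw [if_neg (by simp)]
    by_cases h : ch = '('
    · subst h
      rw [chunksGoB_cons_l, detachGoA_cons_l]
      by_cases hb : (l : Int) - r + 1 = 0
      · rw [if_pos hb, if_pos (show l + 1 = r by omega)]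
      · rw [if_neg hb, if_neg (show ¬ (l + 1 = r) by omega)]
        have hh := ih (cur ++ ['(']) (l + 1) r
        rw [show (l : Int) + 1 - r = l - r + 1 by ring] at hh
        rw [hh, if_neg (by simp)]
    · rw [chunksGoB_cons_r ch h, detachGoA_cons_r ch h]
      by_cases hb : (l : Int) - r + -1 = 0
      · rw [if_pos hb, if_pos (show l = r + 1 by omega)]
      · rw [if_neg hb, if_neg (show ¬ (l = r + 1) by omega)]
        have hh := ih (cur ++ [ch]) l (r + 1)
        rw [show (l : Int) - (r + 1) = l - r + -1 by ring] at hh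
        rw [hh, if_neg (by simp)]

-- the right-to-left fold over the chunk list computes A's recursion
theorem main_eq : ∀ (n : Nat) (s : List Char), s.length ≤ n →
    recA s = ((chunksGoB s [] 0).reverse).foldl stepB [] := by
  intro n
  induction n with
  | zero =>
    intro s hs
    have : s = [] := List.length_eq_zero_iff.mp (Nat.le_zero.mp hs)
    subst this
    simp [recA, chunksGoB]
  | succ n ih =>
    intro s hs
    by_cases h : s = []
    · subst h; simp [recA, chunksGoB]
    · have hch : chunksGoB s [] 0 =
          (detachGoA s [] 0 0).1 :: chunksGoB (detachGoA s [] 0 0).2 [] 0 := by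
        have hh := chunks_detach s [] 0 0
        simpa [h] using hh
      obtain ⟨b, rest, rfl⟩ := List.exists_cons_of_ne_nil h
      have hlt : (detachGoA (b :: rest) [] 0 0).2.length < (b :: rest).length :=
        detachGoA_snd_lt b rest [] 0 0
      have ihv := ih (detachGoA (b :: rest) [] 0 0).2
        (by simp only [List.length_cons] at hs hlt; omega)
      rw [recA, dif_neg h, hch, List.reverse_cons, List.foldl_append]
      simp only [List.foldl_cons, List.foldl_nil]
      rw [← ihv]
      unfold stepB flipB reverseA
      by_cases hc : cntGoB (detachGoA (b :: rest) [] 0 0).1 0 = 0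
      · rw [if_pos hc, if_pos ((correct_iff _).mpr hc)]
      · rw [if_neg hc, if_neg (fun hx => hc ((correct_iff _).mp hx))]

-- ===== VERDICT (by name: the statement is the Claim_ definition above) =====
theorem recursive_func_spec : Claim_equal_recursive_func := by
  intro string _
  unfold Spec_recursive_func recursive_func recursive_func_alt
  rw [main_eq string.toList.length string.toList le_rfl]
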